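-- pv_equiv track=rewrite | github.com/rajshivendra2026/TraceMAP-RCA-Workbench | src/correlation/session_builder.py | _bucket_generic_messages
-- ===== SOURCE A (Python) =====
-- def _bucket_generic_messages(generic_msgs: list) -> dict:
--     buckets = {
--         "HTTP": [],
--         "TCP": [],
--         "UDP": [],
--         "SCTP": [],
--         "DNS": [],
--         "ICMP": [],
--         "S1AP": [],
--         "NGAP": [],
--         "RANAP": [],
--         "BSSAP": [],
--         "MAP": [],
--         "NAS_EPS": [],
--         "NAS_5GS": [],
--         "PFCP": [],
--         "RADIUS": [],
--     }
--     for message in generic_msgs: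
--         protocol = str(message.get("protocol") or "").upper()
--         if protocol in buckets:
--             buckets[protocol].append(message)
--     return buckets
-- ===== SOURCE B (Python) =====
-- _PROTOCOLS = [
--     "HTTP", "TCP", "UDP", "SCTP", "DNS", "ICMP", "S1AP", "NGAP",
--     "RANAP", "BSSAP", "MAP", "NAS_EPS", "NAS_5GS", "PFCP", "RADIUS",
-- ]
--
-- def _bucket_generic_messages(generic_msgs: list) -> dict:
--     return {
--         p: [m for m in generic_msgs
--             if str(m.get("protocol") or "").upper() == p]
--         for p in _PROTOCOLS
--     }
-- ===== Notes on version B (the rewrite author's own statement) =====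
-- stated objective: alternative
-- what changed: Inverted the traversal: instead of one pass over the messages appending into a mutable fixed-key dict, B is a dict comprehension over the 15 fixed protocol keys, each key getting a filter scan of the message list.
import Mathlib
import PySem

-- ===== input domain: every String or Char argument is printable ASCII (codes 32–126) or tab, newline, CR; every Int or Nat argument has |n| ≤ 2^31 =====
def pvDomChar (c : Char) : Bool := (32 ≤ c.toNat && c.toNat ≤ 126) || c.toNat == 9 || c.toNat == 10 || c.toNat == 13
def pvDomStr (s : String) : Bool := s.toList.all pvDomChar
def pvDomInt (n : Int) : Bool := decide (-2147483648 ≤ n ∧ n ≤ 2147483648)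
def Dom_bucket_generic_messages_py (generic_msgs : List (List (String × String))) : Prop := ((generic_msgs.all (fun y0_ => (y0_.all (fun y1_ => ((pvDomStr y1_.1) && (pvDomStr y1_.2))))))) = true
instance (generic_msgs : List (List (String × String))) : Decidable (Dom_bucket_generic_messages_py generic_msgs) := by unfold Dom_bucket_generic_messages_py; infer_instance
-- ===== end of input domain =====

-- B buckets by mapping over the fixed protocol keys with a per-key filter, instead of A's
-- single mutating pass over the messages; alternative decomposition, same cost up to the
-- constant number of keys.

-- shared normalization: str(message.get("protocol") or "").upper()
-- (x or "" is x when x is a non-empty string and "" when the key is absent or the value is "",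
--  which is exactly getD with default "")
def pvProto (m : List (String × String)) : String :=
  PySem.Str.upper (((PySem.Dict.mk m).get? "protocol").getD "")

def pvProtocols : List String :=
  ["HTTP", "TCP", "UDP", "SCTP", "DNS", "ICMP", "S1AP", "NGAP",
   "RANAP", "BSSAP", "MAP", "NAS_EPS", "NAS_5GS", "PFCP", "RADIUS"]

-- ===== PORT A =====
def bucket_generic_messages_py (generic_msgs : List (List (String × String))) : List (String × List (List (String × String))) :=
  -- the dict literal with the 15 empty buckets
  let init : PySem.Dict String (List (List (String × String))) :=
    PySem.Dict.mk (pvProtocols.map (fun p => (p, [])))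
  let final := generic_msgs.foldl
    (fun buckets message =>
      let protocol := pvProto message
      if buckets.contains protocol then
        buckets.modify protocol [] (fun l => l ++ [message])   -- buckets[protocol].append(message)
      else buckets)
    init
  final.items

-- ===== PORT B =====
def bucket_generic_messages_py_alt (generic_msgs : List (List (String × String))) : List (String × List (List (String × String))) :=
  pvProtocols.map (fun p => (p, generic_msgs.filter (fun m => pvProto m == p)))

-- ===== PRECONDITION & SPEC =====
def Spec_bucket_generic_messages_py (generic_msgs : List (List (String × String))) (out : List (String × List (List (String × String)))) : Prop := out = bucket_generic_messages_py_alt generic_msgs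
instance (generic_msgs : List (List (String × String))) (out : List (String × List (List (String × String)))) : Decidable (Spec_bucket_generic_messages_py generic_msgs out) := by unfold Spec_bucket_generic_messages_py; infer_instance

-- ===== CLAIM (what is proved, stated in full; the proofs are below) =====
def Claim_equal_bucket_generic_messages_py : Prop := ∀ (generic_msgs : List (List (String × String))), Dom_bucket_generic_messages_py generic_msgs → Spec_bucket_generic_messages_py generic_msgs (bucket_generic_messages_py generic_msgs)

-- ===== LEMMAS AND PROOFS =====

theorem pvProtocols_nodup : pvProtocols.Nodup := by decide

theorem pvStep_invariant (ms : List (List (String × String)))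
    (g : String → List (List (String × String))) :
    ms.foldl
      (fun buckets message =>
        let protocol := pvProto message
        if buckets.contains protocol then
          buckets.modify protocol [] (fun l => l ++ [message])
        else buckets)
      (PySem.Dict.mk (pvProtocols.map (fun p => (p, g p))))
    = PySem.Dict.mk (pvProtocols.map
        (fun p => (p, g p ++ ms.filter (fun m => pvProto m == p)))) := by
  induction ms generalizing g with
  | nil =>
    simp
  | cons m ms ih =>
    rw [List.foldl_cons]
    by_cases hq : pvProto m ∈ pvProtocols
    · have hcon : (PySem.Dict.mk (pvProtocols.map (fun p => (p, g p)))).contains (pvProto m) = true := by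
        simpa [PySem.Dict.contains, List.any_map] using hq
      have hkeys : (PySem.Dict.mk (pvProtocols.map (fun p => (p, g p)))).keys = pvProtocols := by
        simp only [pysem, List.map_map]
        rw [show ((fun x : String × List (List (String × String)) => x.1) ∘ fun p => (p, g p)) = id from rfl,
            List.map_id]
      have hmem : (pvProto m, g (pvProto m)) ∈ pvProtocols.map (fun p => (p, g p)) :=
        List.mem_map_of_mem hq
      have hnodup : (PySem.Dict.mk (pvProtocols.map (fun p => (p, g p)))).keys.Nodup := by
        rw [hkeys]; exact pvProtocols_nodup
      have hget : (PySem.Dict.mk (pvProtocols.map (fun p => (p, g p)))).getD (pvProto m) [] = g (pvProto m) :=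
        PySem.Dict.getD_of_mem_items _ hmem hnodup []
      have hitems : ((PySem.Dict.mk (pvProtocols.map (fun p => (p, g p)))).modify (pvProto m) [] (fun l => l ++ [m])).items
          = pvProtocols.map (fun p => (p, if p = pvProto m then g p ++ [m] else g p)) := by
        simp only [PySem.Dict.modify]
        rw [PySem.Dict.items_insert_of_contains _ _ hcon, hget, List.map_map]
        apply List.map_congr_left
        intro p _
        by_cases hpq : p = pvProto m
        · simp [hpq]
        · simp [hpq]
      have hmod : (PySem.Dict.mk (pvProtocols.map (fun p => (p, g p)))).modify (pvProto m) [] (fun l => l ++ [m])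
          = PySem.Dict.mk (pvProtocols.map (fun p => (p, if p = pvProto m then g p ++ [m] else g p))) :=
        congrArg PySem.Dict.mk hitems
      simp only [hcon, if_true]
      rw [hmod, ih]
      congr 1
      apply List.map_congr_left
      intro p _
      by_cases hpq : p = pvProto m
      · subst hpq; simp
      · have : (pvProto m == p) = false := by
          simp; exact fun h => hpq h.symm
        simp [hpq, this]
    · have hcon : (PySem.Dict.mk (pvProtocols.map (fun p => (p, g p)))).contains (pvProto m) = false := by
        simp [PySem.Dict.contains, List.any_map]
        intro p hp h
        exact hq (h ▸ hp)
      simp only [hcon, if_false, Bool.false_eq_true]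
      rw [ih]
      congr 1
      apply List.map_congr_left
      intro p hp
      have : (pvProto m == p) = false := by
        simp; exact fun h => hq (h ▸ hp)
      simp [this]

-- ===== VERDICT (by name: the statement is the Claim_ definition above) =====
theorem bucket_generic_messages_py_spec : Claim_equal_bucket_generic_messages_py := by
  intro msgs _
  show _ = _
  unfold bucket_generic_messages_py bucket_generic_messages_py_alt
  simp only []
  rw [show PySem.Dict.mk (pvProtocols.map (fun p => (p, ([] : List (List (String × String))))))
      = PySem.Dict.mk (pvProtocols.map (fun p => (p, (fun _ => ([] : List (List (String × String)))) p))) from rfl]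
  rw [pvStep_invariant msgs (fun _ => [])]
  simp
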